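-- pv_equiv track=rewrite | github.com/namnt99bioinfo/rosalind_biotech | code/FindingASplicedMotif.py | findASplicedMotif
-- ===== SOURCE A (Python) =====
-- def findASplicedMotif(s1, s2):
--     indices = []
--     i = j = 0
--     while i < len(s1) and j < len(s2):
--         if s1[i] == s2[j]:
--             indices.append(i + 1)
--             j += 1
--         i += 1
--     return ' '.join(str(value) for value in indices)
-- ===== SOURCE B (Python) =====
-- def findASplicedMotif(s1, s2):
--     pos = {}
--     for i, c in enumerate(s1):
--         pos.setdefault(c, []).append(i)
--     out = []
--     cur = 0
--     for c in s2:
--         lst = pos.get(c, [])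
--         if not lst or lst[-1] < cur:
--             break
--         lo, hi = 0, len(lst)
--         while lo < hi:
--             mid = (lo + hi) // 2
--             if lst[mid] < cur:
--                 lo = mid + 1
--             else:
--                 hi = mid
--         p = lst[lo]
--         out.append(p + 1)
--         cur = p + 1
--     return ' '.join(str(v) for v in out)
-- ===== Notes on version B (the rewrite author's own statement) =====
-- stated objective: alternative
-- what changed: B precomputes a dict mapping each character of s1 to the sorted list of its positions, then locates each motif character's next occurrence by binary search (lower bound) in that list, instead of A's single char-by-char scan of s1 with two pointers.
import Mathlib
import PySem

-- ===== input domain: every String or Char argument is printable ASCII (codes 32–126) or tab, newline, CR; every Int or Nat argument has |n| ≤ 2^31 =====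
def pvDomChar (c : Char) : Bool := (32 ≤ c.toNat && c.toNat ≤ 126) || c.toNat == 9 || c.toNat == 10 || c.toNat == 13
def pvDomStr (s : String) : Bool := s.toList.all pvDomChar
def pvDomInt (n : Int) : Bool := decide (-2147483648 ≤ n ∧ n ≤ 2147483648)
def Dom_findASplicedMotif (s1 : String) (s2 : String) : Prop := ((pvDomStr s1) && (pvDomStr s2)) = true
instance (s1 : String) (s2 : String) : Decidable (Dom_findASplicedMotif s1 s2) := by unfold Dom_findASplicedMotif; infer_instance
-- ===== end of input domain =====

-- B answers each motif character by binary search in a precomputed per-character position index instead of A's two-pointer scan of s1; alternative algorithm, same result.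


-- ===== PORT A =====
-- A's while loop: i walks s1, j walks s2; on a character match record i+1 and advance j.
-- i advances every iteration, so the loop is structural recursion on the unread suffix of s1.
def pvLoopA : List Char → Nat → List Char → List Int
  | [], _, _ => []
  | _, _, [] => []
  | c :: r1, i, c2 :: r2 =>
    if c = c2 then ((i : Int) + 1) :: pvLoopA r1 (i + 1) r2
    else pvLoopA r1 (i + 1) (c2 :: r2)

def findASplicedMotif (s1 : String) (s2 : String) : String :=
  PySem.Str.join " " ((pvLoopA s1.toList 0 s2.toList).map PySem.Int.toStr)

-- ===== PORT B =====
-- Source B's inner `while lo < hi` binary search; lo, hi are nonnegative ints kept as Nat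
-- (Python's (lo+hi)//2 on nonnegative ints is Nat division). lst[mid] is PySem.List.pyGetD
-- (mid is always in range on the executed path: 0 ≤ lo ≤ mid < hi ≤ len(lst)).
-- (fuel = hi - lo is a pure totality guard: each iteration shrinks hi - lo by at least 1,
-- so the fuel is never exhausted and the computation is exactly the Python loop's)
def pvBSGo (lst : List Int) (cur : Int) : Nat → Nat → Nat → Nat
  | 0, lo, _ => lo
  | fuel + 1, lo, hi =>
    if lo < hi then
      if PySem.List.pyGetD lst (((lo + hi) / 2 : Nat) : Int) 0 < cur then
        pvBSGo lst cur fuel ((lo + hi) / 2 + 1) hi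
      else pvBSGo lst cur fuel lo ((lo + hi) / 2)
    else lo

def pvBS (lst : List Int) (cur : Int) (lo hi : Nat) : Nat :=
  pvBSGo lst cur (hi - lo) lo hi

-- Source B's index build: `for i, c in enumerate(s1): pos.setdefault(c, []).append(i)`
-- (setdefault(c, []) followed by append is Dict.modify with default []).
def pvIndexB (cs : List Char) : PySem.Dict Char (List Int) :=
  (PySem.List.enumerate cs).foldl (fun d p => d.modify p.2 [] (· ++ [p.1])) PySem.Dict.empty

-- Source B's `for c in s2` loop with cursor cur; lst[-1] and lst[lo] via pyGetD
-- (both in range on the executed path: `not lst` was checked, and lo < len(lst) there).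
def pvLoopB (idx : PySem.Dict Char (List Int)) : List Char → Int → List Int
  | [], _ => []
  | c :: r, cur =>
    let lst := idx.getD c []
    if lst = [] then []
    else if PySem.List.pyGetD lst (-1) 0 < cur then []
    else
      let p := PySem.List.pyGetD lst ((pvBS lst cur 0 lst.length : Nat) : Int) 0
      (p + 1) :: pvLoopB idx r (p + 1)

def findASplicedMotif_alt (s1 : String) (s2 : String) : String :=
  PySem.Str.join " " ((pvLoopB (pvIndexB s1.toList) s2.toList 0).map PySem.Int.toStr)

-- ===== PRECONDITION & SPEC =====
def Spec_findASplicedMotif (s1 : String) (s2 : String) (out : String) : Prop := out = findASplicedMotif_alt s1 s2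
instance (s1 : String) (s2 : String) (out : String) : Decidable (Spec_findASplicedMotif s1 s2 out) := by unfold Spec_findASplicedMotif; infer_instance

-- ===== CLAIM (what is proved, stated in full; the proofs are below) =====
def Claim_equal_findASplicedMotif : Prop := ∀ (s1 : String) (s2 : String), Dom_findASplicedMotif s1 s2 → Spec_findASplicedMotif s1 s2 (findASplicedMotif s1 s2)

-- ===== LEMMAS AND PROOFS =====

-- Proof-only intermediate: the greedy loop phrased with str.find-style search from a cursor.
def pvLoopF (s1 : String) : List Char → Nat → List Int
  | [], _ => []
  | c :: r, start =>
    let pos := PySem.Str.findFrom s1 (String.ofList [c]) (start : Int)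
    if pos = -1 then []
    else (pos + 1) :: pvLoopF s1 r (pos.toNat + 1)

-- positions (as Ints) of c in cs, offset by i
def pvPosList (cs : List Char) (c : Char) (i : Nat) : List Int :=
  match cs with
  | [] => []
  | d :: r => if d = c then ((i : Int)) :: pvPosList r c (i + 1) else pvPosList r c (i + 1)

lemma pv_singleton_prefix {c : Char} {l : List Char} : [c] <+: l ↔ ∃ t, l = c :: t := by
  cases l with
  | nil => simp
  | cons d r => simp [List.cons_prefix_cons, eq_comm]

lemma pv_singleton_infix {c : Char} {l : List Char} : [c] <:+: l ↔ c ∈ l := by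
  constructor
  · intro h; exact h.mem (by simp)
  · intro h
    obtain ⟨l1, l2, rfl⟩ := List.append_of_mem h
    exact ⟨l1, l2, by simp⟩


lemma pv_prefix_drop_iff {c : Char} {cs : List Char} {j : Nat} :
    ([c] <+: cs.drop j) ↔ cs[j]? = some c := by
  rw [pv_singleton_prefix]
  constructor
  · rintro ⟨t, ht⟩
    have hj : j < cs.length := by
      by_contra h
      rw [List.drop_eq_nil_of_le (by omega)] at ht
      simp at ht
    have hcd : cs[j] :: cs.drop (j + 1) = c :: t := by
      rw [List.getElem_cons_drop hj, ht]
    rw [List.getElem?_eq_getElem hj, (List.cons_eq_cons.mp hcd).1]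
  · intro hj'
    have hj : j < cs.length := by
      by_contra h
      rw [List.getElem?_eq_none (by omega)] at hj'
      simp at hj'
    have hc : cs[j] = c := by
      rw [List.getElem?_eq_getElem hj] at hj'
      exact Option.some_injective _ hj'
    exact ⟨cs.drop (j + 1), by rw [← hc]; exact (List.getElem_cons_drop hj).symm⟩

lemma pvIndexB_go (c : Char) : ∀ (cs : List Char) (i : Nat) (d : PySem.Dict Char (List Int)),
    ((PySem.List.enumerate cs ((i : Nat) : Int)).foldl
        (fun d p => d.modify p.2 [] (· ++ [p.1])) d).getD c []
      = d.getD c [] ++ pvPosList cs c i := by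
  intro cs
  induction cs with
  | nil => intro i d; simp [PySem.List.enumerate_nil, pvPosList]
  | cons x r ih =>
    intro i d
    rw [PySem.List.enumerate_cons]
    simp only [List.foldl_cons]
    have hcast : ((i : Nat) : Int) + 1 = (((i + 1 : Nat)) : Int) := by push_cast; ring
    rw [hcast, ih (i + 1)]
    rw [PySem.Dict.getD_modify]
    by_cases hcx : c = x
    · subst hcx
      simp [pvPosList, List.append_assoc]
    · rw [if_neg hcx]
      simp only [pvPosList]
      rw [if_neg (fun h => hcx h.symm)]

lemma pvIndexB_getD (cs : List Char) (c : Char) :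
    (pvIndexB cs).getD c [] = pvPosList cs c 0 := by
  have h := pvIndexB_go c cs 0 PySem.Dict.empty
  simpa [pvIndexB, PySem.Dict.getD_empty] using h

lemma mem_pvPosList : ∀ (cs : List Char) (c : Char) (i : Nat) (p : Int),
    p ∈ pvPosList cs c i ↔ ∃ j : Nat, cs[j]? = some c ∧ p = (i : Int) + j := by
  intro cs
  induction cs with
  | nil => intro c i p; simp [pvPosList]
  | cons d r ih =>
    intro c i p
    simp only [pvPosList]
    by_cases hdc : d = c
    · rw [if_pos hdc]
      simp only [List.mem_cons, ih]
      constructor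
      · rintro (rfl | ⟨j, hj, rfl⟩)
        · exact ⟨0, by simp [hdc], by simp⟩
        · exact ⟨j + 1, by simpa using hj, by push_cast; ring⟩
      · rintro ⟨j, hj, rfl⟩
        cases j with
        | zero => left; simp
        | succ k =>
          right
          refine ⟨k, by simpa using hj, by push_cast; ring⟩
    · rw [if_neg hdc]
      rw [ih]
      constructor
      · rintro ⟨j, hj, rfl⟩
        exact ⟨j + 1, by simpa using hj, by push_cast; ring⟩
      · rintro ⟨j, hj, rfl⟩
        cases j with
        | zero => simp at hj; exact absurd hj hdc
        | succ k =>
          refine ⟨k, by simpa using hj, by push_cast; ring⟩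

lemma pvPosList_lb (cs : List Char) (c : Char) (i : Nat) (p : Int)
    (hp : p ∈ pvPosList cs c i) : (i : Int) ≤ p := by
  obtain ⟨j, _, rfl⟩ := (mem_pvPosList cs c i p).1 hp
  omega

lemma pvPosList_pairwise : ∀ (cs : List Char) (c : Char) (i : Nat),
    (pvPosList cs c i).Pairwise (· < ·) := by
  intro cs
  induction cs with
  | nil => intro c i; simp [pvPosList]
  | cons d r ih =>
    intro c i
    simp only [pvPosList]
    by_cases hdc : d = c
    · rw [if_pos hdc]
      refine List.pairwise_cons.mpr ⟨fun p hp => ?_, ih c (i + 1)⟩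
      have := pvPosList_lb r c (i + 1) p hp
      omega
    · rw [if_neg hdc]; exact ih c (i + 1)

lemma pv_getD_lt {lst : List Int} (hst : lst.Pairwise (· < ·)) {a b : Nat}
    (hab : a < b) (hb : b < lst.length) : lst.getD a 0 < lst.getD b 0 := by
  rw [List.getD_eq_getElem lst 0 (by omega), List.getD_eq_getElem lst 0 hb]
  exact List.pairwise_iff_getElem.mp hst a b (by omega) hb hab

lemma pv_le_getLast {lst : List Int} (hst : lst.Pairwise (· < ·)) (hne : lst ≠ [])
    {x : Int} (hx : x ∈ lst) : x ≤ lst.getLast hne := by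
  rw [List.getLast_eq_getElem]
  obtain ⟨t, ht, rfl⟩ := List.mem_iff_getElem.mp hx
  rcases Nat.lt_or_ge t (lst.length - 1) with h | h
  · exact le_of_lt (List.pairwise_iff_getElem.mp hst t (lst.length - 1) ht (by omega) h)
  · have : t = lst.length - 1 := by omega
    subst this; exact le_refl _

lemma pvBSGo_spec (lst : List Int) (hst : lst.Pairwise (· < ·)) (cur : Int) :
    ∀ (n lo hi : Nat), hi - lo ≤ n → lo ≤ hi → hi ≤ lst.length →
    (∀ t, t < lo → lst.getD t 0 < cur) →
    (∀ t, hi ≤ t → t < lst.length → ¬ lst.getD t 0 < cur) →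
    lo ≤ pvBSGo lst cur n lo hi ∧ pvBSGo lst cur n lo hi ≤ lst.length ∧
    (∀ t, t < pvBSGo lst cur n lo hi → lst.getD t 0 < cur) ∧
    (pvBSGo lst cur n lo hi < lst.length → ¬ lst.getD (pvBSGo lst cur n lo hi) 0 < cur) := by
  intro n
  induction n with
  | zero =>
    intro lo hi hn hlh hhl hlow hhigh
    have heq : lo = hi := by omega
    rw [pvBSGo]
    exact ⟨le_refl _, by omega, hlow, fun h => hhigh lo (by omega) h⟩
  | succ m ih =>
    intro lo hi hn hlh hhl hlow hhigh
    rw [pvBSGo]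
    by_cases hlt : lo < hi
    · rw [if_pos hlt]
      have hmid1 : lo ≤ (lo + hi) / 2 := by omega
      have hmid2 : (lo + hi) / 2 < hi := by omega
      have hmidlen : (lo + hi) / 2 < lst.length := by omega
      rw [PySem.List.pyGetD_natCast]
      by_cases hm : lst.getD ((lo + hi) / 2) 0 < cur
      · rw [if_pos hm]
        refine (ih ((lo + hi) / 2 + 1) hi (by omega) (by omega) hhl ?_ hhigh).imp
            (fun h => by omega) (fun h => h)
        intro t ht
        rcases Nat.lt_or_ge t lo with h | h
        · exact hlow t h
        · rcases Nat.lt_or_ge t ((lo + hi) / 2) with h2 | h2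
          · exact lt_trans (pv_getD_lt hst h2 hmidlen) hm
          · have : t = (lo + hi) / 2 := by omega
            subst this; exact hm
      · rw [if_neg hm]
        refine (ih lo ((lo + hi) / 2) (by omega) (by omega) (by omega) hlow ?_).imp
            (fun h => h) (fun h => ⟨by omega, h.2⟩)
        intro t ht htl hcon
        rcases Nat.lt_or_ge ((lo + hi) / 2) t with h2 | h2
        · exact hm (lt_trans (pv_getD_lt hst h2 htl) hcon)
        · have : t = (lo + hi) / 2 := by omega
          subst this; exact hm hcon
    · rw [if_neg hlt]
      have heq : lo = hi := by omega
      exact ⟨le_refl _, by omega, hlow, fun h => hhigh lo (by omega) h⟩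

lemma pvBS_spec (lst : List Int) (hst : lst.Pairwise (· < ·)) (cur : Int) :
    ∀ (n lo hi : Nat), hi - lo ≤ n → lo ≤ hi → hi ≤ lst.length →
    (∀ t, t < lo → lst.getD t 0 < cur) →
    (∀ t, hi ≤ t → t < lst.length → ¬ lst.getD t 0 < cur) →
    lo ≤ pvBS lst cur lo hi ∧ pvBS lst cur lo hi ≤ lst.length ∧
    (∀ t, t < pvBS lst cur lo hi → lst.getD t 0 < cur) ∧
    (pvBS lst cur lo hi < lst.length → ¬ lst.getD (pvBS lst cur lo hi) 0 < cur) := by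
  intro n lo hi hn hlh hhl hlow hhigh
  rw [pvBS]
  exact pvBSGo_spec lst hst cur (hi - lo) lo hi (le_refl _) hlh hhl hlow hhigh


lemma pv_BF (s1 : String) : ∀ (cs2 : List Char) (k : Nat), k ≤ s1.toList.length →
    pvLoopB (pvIndexB s1.toList) cs2 ((k : Nat) : Int) = pvLoopF s1 cs2 k := by
  intro cs2
  induction cs2 with
  | nil => intro k hk; simp [pvLoopB, pvLoopF]
  | cons c r ih =>
    intro k hk
    have hlst : (pvIndexB s1.toList).getD c [] = pvPosList s1.toList c 0 :=
      pvIndexB_getD s1.toList c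
    have hst : (pvPosList s1.toList c 0).Pairwise (· < ·) := pvPosList_pairwise s1.toList c 0
    have hsub : (String.ofList [c]).toList = [c] := by simp
    simp only [pvLoopB, pvLoopF, hlst, PySem.Str.findFrom_eq, hsub]
    by_cases hL : pvPosList s1.toList c 0 = []
    · rw [if_pos hL]
      have hneg : PySem.Chars.findFrom s1.toList [c] ((k : Nat) : Int) = -1 := by
        apply (PySem.Chars.findFrom_natCast_eq_neg_one_iff s1.toList [c] k hk).2
        rw [pv_singleton_infix]
        intro hmem
        obtain ⟨j, hjl, hjc⟩ := List.mem_iff_getElem.mp (List.mem_of_mem_drop hmem)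
        have : ((j : Nat) : Int) ∈ pvPosList s1.toList c 0 := by
          rw [mem_pvPosList]
          exact ⟨j, by rw [List.getElem?_eq_getElem hjl, hjc], by push_cast; ring⟩
        rw [hL] at this
        simp at this
      rw [hneg]
      simp
    · rw [if_neg hL]
      have hlast : PySem.List.pyGetD (pvPosList s1.toList c 0) (-1) 0
          = (pvPosList s1.toList c 0).getLast hL := PySem.List.pyGetD_neg_one _ 0 hL
      rw [hlast]
      by_cases hlk : (pvPosList s1.toList c 0).getLast hL < ((k : Nat) : Int)
      · rw [if_pos hlk]
        have hneg : PySem.Chars.findFrom s1.toList [c] ((k : Nat) : Int) = -1 := by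
          apply (PySem.Chars.findFrom_natCast_eq_neg_one_iff s1.toList [c] k hk).2
          rw [pv_singleton_infix]
          intro hmem
          obtain ⟨jd, hjl, hjc⟩ := List.mem_iff_getElem.mp hmem
          have hjlen : k + jd < s1.toList.length := by
            have := hjl; rw [List.length_drop] at this; omega
          have hjc' : s1.toList[k + jd]'hjlen = c := by
            rw [← hjc]; exact (List.getElem_drop ..).symm
          have hmem2 : (((k + jd : Nat)) : Int) ∈ pvPosList s1.toList c 0 := by
            rw [mem_pvPosList]
            exact ⟨k + jd, by rw [List.getElem?_eq_getElem hjlen, hjc'], by push_cast; ring⟩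
          have := pv_le_getLast hst hL hmem2
          omega
        rw [hneg]
        simp
      · rw [if_neg hlk]
        -- binary search returns the least position ≥ k
        obtain ⟨hr0, hrlen', hlo, hhi⟩ := pvBS_spec (pvPosList s1.toList c 0) hst
          ((k : Nat) : Int) (pvPosList s1.toList c 0).length 0 (pvPosList s1.toList c 0).length
          (by omega) (by omega) (le_refl _) (by omega) (by intro t h1 h2; omega)
        have hlen1 : 1 ≤ (pvPosList s1.toList c 0).length := List.length_pos_of_ne_nil hL
        have hrlen : pvBS (pvPosList s1.toList c 0) ((k : Nat) : Int) 0
            (pvPosList s1.toList c 0).length < (pvPosList s1.toList c 0).length := by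
          by_contra hcon
          have heq : pvBS (pvPosList s1.toList c 0) ((k : Nat) : Int) 0
              (pvPosList s1.toList c 0).length = (pvPosList s1.toList c 0).length := by omega
          have hlt := hlo ((pvPosList s1.toList c 0).length - 1) (by omega)
          rw [List.getD_eq_getElem _ 0 (by omega), ← List.getLast_eq_getElem hL] at hlt
          omega
        set r0 := pvBS (pvPosList s1.toList c 0) ((k : Nat) : Int) 0
          (pvPosList s1.toList c 0).length with hr0def
        have hp : PySem.List.pyGetD (pvPosList s1.toList c 0) ((r0 : Nat) : Int) 0
            = (pvPosList s1.toList c 0).getD r0 0 := PySem.List.pyGetD_natCast ..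
        set p := (pvPosList s1.toList c 0).getD r0 0 with hpdef
        have hpel : p = (pvPosList s1.toList c 0)[r0]'hrlen := List.getD_eq_getElem _ 0 hrlen
        have hpmem : p ∈ pvPosList s1.toList c 0 := by rw [hpel]; exact List.getElem_mem hrlen
        obtain ⟨j, hjc, hpj⟩ := (mem_pvPosList s1.toList c 0 p).1 hpmem
        have hpj' : p = (j : Int) := by omega
        have hjlen : j < s1.toList.length := by
          by_contra hcon
          rw [List.getElem?_eq_none (by omega)] at hjc
          simp at hjc
        have hpk : ((k : Nat) : Int) ≤ p := not_lt.mp (hhi hrlen)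
        have hkj : k ≤ j := by omega
        have hmin : ∀ m : Nat, k ≤ m → m < j → s1.toList[m]? ≠ some c := by
          intro m hm1 hm2 hmc
          have hmmem : ((m : Nat) : Int) ∈ pvPosList s1.toList c 0 := by
            rw [mem_pvPosList]; exact ⟨m, hmc, by push_cast; ring⟩
          obtain ⟨t, htl, hte⟩ := List.mem_iff_getElem.mp hmmem
          rcases Nat.lt_or_ge t r0 with h | h
          · have := hlo t h
            rw [List.getD_eq_getElem _ 0 htl, hte] at this
            omega
          · have hge : p ≤ ((m : Nat) : Int) := by
              rcases Nat.lt_or_ge r0 t with h2 | h2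
              · have := List.pairwise_iff_getElem.mp hst r0 t hrlen htl h2
                rw [← hpel, hte] at this; omega
              · have : t = r0 := by omega
                subst this; rw [hpel, hte]
            omega
        -- findFrom equals p
        have hne : PySem.Chars.findFrom s1.toList [c] ((k : Nat) : Int) ≠ -1 := by
          rw [Ne, PySem.Chars.findFrom_natCast_eq_neg_one_iff s1.toList [c] k hk]
          rw [not_not]
          rw [pv_singleton_infix]
          have hdl : (s1.toList.drop k)[j - k]'(by rw [List.length_drop]; omega) = c := by
            rw [List.getElem_drop]
            have : k + (j - k) = j := by omega
            rw [List.getElem?_eq_getElem hjlen] at hjc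
            simp only [this]
            exact Option.some_injective _ hjc
          rw [← hdl]
          exact List.getElem_mem _
        obtain ⟨hFle, hFpre, hFmin⟩ := PySem.Chars.findFrom_natCast_spec s1.toList [c] k hk hne
        set F := PySem.Chars.findFrom s1.toList [c] ((k : Nat) : Int) with hFdef
        have hFj : F.toNat = j := by
          have h1 : ¬ j < F.toNat := by
            intro h
            exact hFmin j hkj h (pv_prefix_drop_iff.mpr hjc)
          have h2 : ¬ F.toNat < j := by
            intro h
            exact hmin F.toNat (by omega) h (pv_prefix_drop_iff.mp hFpre)
          omega
        have hFp : F = p := by omega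
        have hFne' : ¬ F = -1 := hne
        rw [if_neg hFne']
        rw [hp, hFp]
        have hptn : p.toNat = j := by omega
        rw [hptn]
        have hc1 : p + 1 = (((j + 1 : Nat)) : Int) := by omega
        rw [hc1, ih (j + 1) (by omega)]

-- A's loop on the unread suffix of s1 equals the find-based greedy loop
lemma pv_main (s1 : String) : ∀ (n k : Nat) (cs2 : List Char),
    s1.toList.length - k = n → k ≤ s1.toList.length →
    pvLoopA (s1.toList.drop k) k cs2 = pvLoopF s1 cs2 k := by
  intro n
  induction n with
  | zero =>
    intro k cs2 hn hk
    have hdrop : s1.toList.drop k = [] := by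
      apply List.drop_eq_nil_of_le; omega
    rw [hdrop]
    cases cs2 with
    | nil => simp [pvLoopA, pvLoopF]
    | cons c cr =>
      have hsub : (String.ofList [c]).toList = [c] := by simp
      have hneg : PySem.Str.findFrom s1 (String.ofList [c]) (k : Int) = -1 := by
        rw [PySem.Str.findFrom_eq, hsub]
        apply (PySem.Chars.findFrom_natCast_eq_neg_one_iff s1.toList [c] k hk).2
        rw [hdrop, pv_singleton_infix]; simp
      have hA : pvLoopA [] k (c :: cr) = [] := by simp [pvLoopA]
      have hB : pvLoopF s1 (c :: cr) k = [] := by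
        simp only [pvLoopF]; rw [hneg]; simp
      rw [hA, hB]
  | succ m ih =>
    intro k cs2 hn hk
    have hklt : k < s1.toList.length := by omega
    obtain ⟨d, r, hdr⟩ : ∃ d r, s1.toList.drop k = d :: r := by
      cases h : s1.toList.drop k with
      | nil => exfalso; have := List.drop_eq_nil_iff.mp h; omega
      | cons d r => exact ⟨d, r, rfl⟩
    have hdropsucc : s1.toList.drop (k + 1) = r := by
      have : s1.toList.drop (k + 1) = (s1.toList.drop k).drop 1 := by
        rw [List.drop_drop]
      rw [this, hdr]; simp
    cases cs2 with
    | nil => rw [hdr]; simp [pvLoopA, pvLoopF]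
    | cons c cr =>
      by_cases hdc : d = c
      · subst hdc
        have hinfix : ([d] : List Char) <:+: s1.toList.drop k := by
          rw [hdr, pv_singleton_infix]; simp
        have hne : PySem.Chars.findFrom s1.toList [d] (k : Int) ≠ -1 := by
          intro h
          exact ((PySem.Chars.findFrom_natCast_eq_neg_one_iff s1.toList [d] k hk).1 h) hinfix
        obtain ⟨hle, hpre, hmin⟩ := PySem.Chars.findFrom_natCast_spec s1.toList [d] k hk hne
        set p := PySem.Chars.findFrom s1.toList [d] (k : Int) with hp
        have hpk : p = (k : Int) := by
          by_cases h : k < p.toNat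
          · exact absurd (by rw [pv_singleton_prefix]; exact ⟨r, hdr⟩) (hmin k le_rfl h)
          · omega
        have hsub : (String.ofList [d]).toList = [d] := by simp
        have hfind : PySem.Str.findFrom s1 (String.ofList [d]) (k : Int) = (k : Int) := by
          rw [PySem.Str.findFrom_eq, hsub]; exact hpk
        have hih := ih (k + 1) cr (by omega) (by omega)
        rw [hdr]
        have hA : pvLoopA (d :: r) k (d :: cr) = ((k : Int) + 1) :: pvLoopA r (k + 1) cr := by
          simp [pvLoopA]
        have hB : pvLoopF s1 (d :: cr) k = ((k : Int) + 1) :: pvLoopF s1 cr (k + 1) := by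
          simp only [pvLoopF]
          rw [hfind, if_neg (by omega)]
          simp
        rw [hA, hB, ← hih, hdropsucc]
      · have hsub : (String.ofList [c]).toList = [c] := by simp
        have hshift : PySem.Chars.findFrom s1.toList [c] (k : Int)
            = PySem.Chars.findFrom s1.toList [c] ((k + 1 : Nat) : Int) := by
          by_cases hmem : c ∈ r
          · have hne1 : PySem.Chars.findFrom s1.toList [c] (k : Int) ≠ -1 := by
              intro h
              have := (PySem.Chars.findFrom_natCast_eq_neg_one_iff s1.toList [c] k hk).1 h
              exact this (by rw [hdr, pv_singleton_infix]; simp [hmem])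
            have hne2 : PySem.Chars.findFrom s1.toList [c] ((k + 1 : Nat) : Int) ≠ -1 := by
              intro h
              have := (PySem.Chars.findFrom_natCast_eq_neg_one_iff s1.toList [c] (k + 1) (by omega)).1 h
              exact this (by rw [hdropsucc, pv_singleton_infix]; exact hmem)
            obtain ⟨hle1, hpre1, hmin1⟩ := PySem.Chars.findFrom_natCast_spec s1.toList [c] k hk hne1
            obtain ⟨hle2, hpre2, hmin2⟩ := PySem.Chars.findFrom_natCast_spec s1.toList [c] (k + 1) (by omega) hne2
            set p := PySem.Chars.findFrom s1.toList [c] (k : Int) with hp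
            set q := PySem.Chars.findFrom s1.toList [c] ((k + 1 : Nat) : Int) with hq
            have hpnek : p.toNat ≠ k := by
              intro h
              rw [h, hdr, pv_singleton_prefix] at hpre1
              obtain ⟨t, ht⟩ := hpre1
              exact hdc (List.cons_eq_cons.mp ht).1
            have hpk1 : k + 1 ≤ p.toNat := by omega
            have h1 : ¬ p.toNat < q.toNat := fun h => hmin2 p.toNat hpk1 h hpre1
            have h2 : ¬ q.toNat < p.toNat := fun h => hmin1 q.toNat (by omega) h hpre2
            omega
          · have hnm1 : PySem.Chars.findFrom s1.toList [c] (k : Int) = -1 := by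
              apply (PySem.Chars.findFrom_natCast_eq_neg_one_iff s1.toList [c] k hk).2
              rw [hdr, pv_singleton_infix]; simp [hmem, Ne.symm hdc]
            have hnm2 : PySem.Chars.findFrom s1.toList [c] ((k + 1 : Nat) : Int) = -1 := by
              apply (PySem.Chars.findFrom_natCast_eq_neg_one_iff s1.toList [c] (k + 1) (by omega)).2
              rw [hdropsucc, pv_singleton_infix]; exact hmem
            rw [hnm1, hnm2]
        have hih := ih (k + 1) (c :: cr) (by omega) (by omega)
        rw [hdr]
        simp only [pvLoopA, if_neg hdc]
        rw [hdropsucc] at hih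
        rw [hih]
        simp only [pvLoopF, PySem.Str.findFrom_eq, hsub, hshift]

-- ===== VERDICT (by name: the statement is the Claim_ definition above) =====
theorem findASplicedMotif_spec : Claim_equal_findASplicedMotif := by
  intro s1 s2 _
  unfold Spec_findASplicedMotif findASplicedMotif findASplicedMotif_alt
  have hm := pv_main s1 (s1.toList.length - 0) 0 s2.toList rfl (by omega)
  have hb := pv_BF s1 s2.toList 0 (by omega)
  simp at hm hb
  rw [hm, ← hb]
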